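-- pv_equiv track=rewrite | github.com/yy487/VS-tool | ADV++/kankin_font_patch.py | code_to_glyph_index
-- ===== SOURCE A (Python) =====
-- from typing import Any, Dict, Iterable, List, Optional, Sequence, Tuple
--
-- CP932_RANGES: List[Tuple[int, int, int, str]] = [
--     (0, 0x0020, 0x007E, "ascii"),
--     (1, 0x00A1, 0x00DF, "hankaku_kana"),
--     (2, 0x8140, 0x84BE, "jis_symbols_kana"),
--     (3, 0x889F, 0x9872, "jis_kanji_1a"),
--     (4, 0x989F, 0x9FFC, "jis_kanji_1b"),
--     (5, 0xE040, 0xEAA4, "ibm_nec_ext"),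
-- ]
--
-- def code_to_glyph_index(code: int, range_mask: int) -> Optional[int]:
--     idx = 0
--     for bit, start, end, _name in CP932_RANGES:
--         if not (range_mask & (1 << bit)):
--             continue
--         count = end - start + 1
--         if start <= code <= end:
--             return idx + (code - start)
--         idx += count
--     return None
-- ===== SOURCE B (Python) =====
-- from typing import List, Optional, Tuple
--
-- CP932_RANGES: List[Tuple[int, int, int, str]] = [
--     (0, 0x0020, 0x007E, "ascii"),
--     (1, 0x00A1, 0x00DF, "hankaku_kana"),
--     (2, 0x8140, 0x84BE, "jis_symbols_kana"),
--     (3, 0x889F, 0x9872, "jis_kanji_1a"),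
--     (4, 0x989F, 0x9FFC, "jis_kanji_1b"),
--     (5, 0xE040, 0xEAA4, "ibm_nec_ext"),
-- ]
--
-- def code_to_glyph_index(code: int, range_mask: int) -> Optional[int]:
--     # Phase 1: locate the (unique) range containing code.
--     pos = None
--     for i, (bit, start, end, _name) in enumerate(CP932_RANGES):
--         if start <= code <= end:
--             pos, match_bit, match_start = i, bit, start
--             break
--     if pos is None:
--         return None
--     # Phase 2: containing range must be enabled.
--     if not (range_mask & (1 << match_bit)):
--         return None
--     # Phase 3: offset = total size of the enabled ranges before it.
--     offset = sum(end - start + 1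
--                  for bit, start, end, _name in CP932_RANGES[:pos]
--                  if range_mask & (1 << bit))
--     return offset + (code - match_start)
-- ===== Notes on version B (the rewrite author's own statement) =====
-- stated objective: alternative
-- what changed: Replaces A's single loop with a running glyph-index accumulator by a three-phase decomposition: locate the containing range first, reject if its bit is disabled, then compute the offset as the sum of the sizes of the enabled ranges preceding it.
import Mathlib
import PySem

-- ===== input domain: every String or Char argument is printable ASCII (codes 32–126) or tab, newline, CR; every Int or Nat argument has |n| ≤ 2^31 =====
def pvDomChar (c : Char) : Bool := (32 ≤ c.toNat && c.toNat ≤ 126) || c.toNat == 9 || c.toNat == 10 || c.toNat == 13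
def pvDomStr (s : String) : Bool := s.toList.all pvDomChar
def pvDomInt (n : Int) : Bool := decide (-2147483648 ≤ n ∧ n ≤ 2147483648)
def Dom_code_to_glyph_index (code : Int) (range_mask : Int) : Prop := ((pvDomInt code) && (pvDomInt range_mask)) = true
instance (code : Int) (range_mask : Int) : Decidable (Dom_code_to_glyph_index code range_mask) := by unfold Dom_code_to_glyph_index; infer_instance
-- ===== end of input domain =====

-- B replaces A's single loop with a running glyph-index accumulator by a three-phase
-- decomposition (locate the containing range, check its bit, sum the sizes of the enabled
-- preceding ranges); same cost, no behavioural difference.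
-- Shared module-level constant CP932_RANGES (bit, start, end, name); bit kept as Nat so that
-- Python's 1 << bit is ported exactly as (1 : Int) <<< bit.
def CP932_RANGES : List (Nat × Int × Int × String) :=
  [ (0, 0x0020, 0x007E, "ascii"),
    (1, 0x00A1, 0x00DF, "hankaku_kana"),
    (2, 0x8140, 0x84BE, "jis_symbols_kana"),
    (3, 0x889F, 0x9872, "jis_kanji_1a"),
    (4, 0x989F, 0x9FFC, "jis_kanji_1b"),
    (5, 0xE040, 0xEAA4, "ibm_nec_ext") ]

-- ===== PORT A =====
-- A's for-loop over CP932_RANGES with the running accumulator idx.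
-- range_mask & (1 << bit) is PySem.Int.band range_mask ((1 : Int) <<< bit) (Python-exact on negatives).
def pvLoopA (code range_mask : Int) : List (Nat × Int × Int × String) → Int → Option Int
  | [], _ => none
  | (bit, start, e, _name) :: rest, idx =>
    if PySem.Int.band range_mask ((1 : Int) <<< bit) = 0 then pvLoopA code range_mask rest idx
    else
      let count := e - start + 1
      if start ≤ code ∧ code ≤ e then some (idx + (code - start))
      else pvLoopA code range_mask rest (idx + count)

def code_to_glyph_index (code : Int) (range_mask : Int) : Option Int :=
  pvLoopA code range_mask CP932_RANGES 0

-- ===== PORT B =====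
-- Phase 1 of Source B: the enumerate loop locating the containing range → (position, bit, start).
def pvFindB (code : Int) : List (Nat × Int × Int × String) → Nat → Option (Nat × Nat × Int)
  | [], _ => none
  | (bit, start, e, _name) :: rest, i =>
    if start ≤ code ∧ code ≤ e then some (i, bit, start)
    else pvFindB code rest (i + 1)

def code_to_glyph_index_alt (code : Int) (range_mask : Int) : Option Int :=
  match pvFindB code CP932_RANGES 0 with
  | none => none
  | some (pos, match_bit, match_start) =>
    -- Phase 2 of Source B: the containing range must be enabled.
    if PySem.Int.band range_mask ((1 : Int) <<< match_bit) = 0 then none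
    else
      -- Phase 3 of Source B: sum of sizes of the enabled ranges before pos (CP932_RANGES[:pos]).
      let offset := ((CP932_RANGES.take pos).filter
          (fun (r : Nat × Int × Int × String) =>
            !(PySem.Int.band range_mask ((1 : Int) <<< r.1) = 0))).foldl
          (fun (acc : Int) (r : Nat × Int × Int × String) => acc + (r.2.2.1 - r.2.1 + 1)) 0
      some (offset + (code - match_start))

-- ===== PRECONDITION & SPEC =====
def Spec_code_to_glyph_index (code : Int) (range_mask : Int) (out : Option Int) : Prop := out = code_to_glyph_index_alt code range_mask
instance (code : Int) (range_mask : Int) (out : Option Int) : Decidable (Spec_code_to_glyph_index code range_mask out) := by unfold Spec_code_to_glyph_index; infer_instance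

-- ===== CLAIM (what is proved, stated in full; the proofs are below) =====
def Claim_equal_code_to_glyph_index : Prop := ∀ (code : Int) (range_mask : Int), Dom_code_to_glyph_index code range_mask → Spec_code_to_glyph_index code range_mask (code_to_glyph_index code range_mask)

-- ===== LEMMAS AND PROOFS =====

-- Sum of the sizes of the enabled ranges, recursively (proof-side view of B's phase 3).
def pvSumEnabled (range_mask : Int) : List (Nat × Int × Int × String) → Int
  | [] => 0
  | r :: rest =>
    (if PySem.Int.band range_mask ((1 : Int) <<< r.1) = 0 then 0 else (r.2.2.1 - r.2.1 + 1))
      + pvSumEnabled range_mask rest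

theorem pvFindB_shift (code : Int) (L : List (Nat × Int × Int × String)) (i : Nat) :
    pvFindB code L (i + 1) = Option.map (fun p => (p.1 + 1, p.2)) (pvFindB code L i) := by
  induction L generalizing i with
  | nil => simp [pvFindB]
  | cons r rest ih =>
    obtain ⟨bit, s, e, nm⟩ := r
    by_cases hc : s ≤ code ∧ code ≤ e
    · simp [pvFindB, hc]
    · simp only [pvFindB, if_neg hc]
      exact ih (i + 1)

theorem pvLoopA_none (code m : Int) (L : List (Nat × Int × Int × String)) (idx : Int)
    (h : ∀ r ∈ L, ¬(r.2.1 ≤ code ∧ code ≤ r.2.2.1)) :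
    pvLoopA code m L idx = none := by
  induction L generalizing idx with
  | nil => simp [pvLoopA]
  | cons r rest ih =>
    obtain ⟨bit, s, e, nm⟩ := r
    have hc : ¬(s ≤ code ∧ code ≤ e) := h (bit, s, e, nm) (by simp)
    have htl : ∀ r ∈ rest, ¬(r.2.1 ≤ code ∧ code ≤ r.2.2.1) := fun r hr => h r (by simp [hr])
    by_cases hb : PySem.Int.band m ((1 : Int) <<< bit) = 0
    · simpa [pvLoopA, hb] using ih idx htl
    · simpa [pvLoopA, hb, hc] using ih _ htl

theorem pvFoldSum (range_mask : Int) (L : List (Nat × Int × Int × String)) (acc : Int) :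
    (L.filter (fun (r : Nat × Int × Int × String) =>
        !(PySem.Int.band range_mask ((1 : Int) <<< r.1) = 0))).foldl
      (fun (acc : Int) (r : Nat × Int × Int × String) => acc + (r.2.2.1 - r.2.1 + 1)) acc
      = acc + pvSumEnabled range_mask L := by
  induction L generalizing acc with
  | nil => simp [pvSumEnabled]
  | cons r rest ih =>
    by_cases hb : PySem.Int.band range_mask ((1 : Int) <<< r.1) = 0
    · simp [hb, ih, pvSumEnabled]
    · simp only [List.filter_cons, hb, decide_false, Bool.not_false, if_true, List.foldl_cons, ih]
      simp [pvSumEnabled, hb]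
      omega

theorem pvLoopA_char (code m : Int) (L : List (Nat × Int × Int × String)) (idx : Int)
    (hdisj : L.Pairwise (fun r r' => (r.2.1 ≤ code ∧ code ≤ r.2.2.1) →
        ¬(r'.2.1 ≤ code ∧ code ≤ r'.2.2.1))) :
    pvLoopA code m L idx =
      match pvFindB code L 0 with
      | none => none
      | some (pos, bit, s) =>
        if PySem.Int.band m ((1 : Int) <<< bit) = 0 then none
        else some ((idx + pvSumEnabled m (L.take pos)) + (code - s)) := by
  induction L generalizing idx with
  | nil => simp [pvLoopA, pvFindB]
  | cons r rest ih =>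
    obtain ⟨bit, s, e, nm⟩ := r
    rcases List.pairwise_cons.mp hdisj with ⟨hhd, htl⟩
    by_cases hc : s ≤ code ∧ code ≤ e
    · simp only [pvFindB, if_pos hc]
      by_cases hb : PySem.Int.band m ((1 : Int) <<< bit) = 0
      · simp only [pvLoopA, if_pos hb]
        exact pvLoopA_none code m rest idx (fun r' hr' => hhd r' hr' hc)
      · simp only [pvLoopA, if_neg hb, if_pos hc, List.take, pvSumEnabled,
          Option.some.injEq]
        omega
    · simp only [pvFindB, if_neg hc, pvFindB_shift]
      by_cases hb : PySem.Int.band m ((1 : Int) <<< bit) = 0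
      · rw [show pvLoopA code m ((bit, s, e, nm) :: rest) idx = pvLoopA code m rest idx by
          simp [pvLoopA, hb]]
        rw [ih idx htl]
        cases hfind : pvFindB code rest 0 with
        | none => simp
        | some p =>
          obtain ⟨pos, b2, s2⟩ := p
          simp only [Option.map_some]
          by_cases hb2 : PySem.Int.band m ((1 : Int) <<< b2) = 0
          · simp [hb2]
          · simp only [if_neg hb2, List.take_succ_cons, pvSumEnabled, if_pos hb,
              Option.some.injEq]
            omega
      · rw [show pvLoopA code m ((bit, s, e, nm) :: rest) idx
              = pvLoopA code m rest (idx + (e - s + 1)) by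
          simp [pvLoopA, hb, hc]]
        rw [ih _ htl]
        cases hfind : pvFindB code rest 0 with
        | none => simp
        | some p =>
          obtain ⟨pos, b2, s2⟩ := p
          simp only [Option.map_some]
          by_cases hb2 : PySem.Int.band m ((1 : Int) <<< b2) = 0
          · simp [hb2]
          · simp only [if_neg hb2, List.take_succ_cons, pvSumEnabled, if_neg hb,
              Option.some.injEq]
            omega

theorem pvRangesDisjoint (code : Int) :
    CP932_RANGES.Pairwise (fun r r' => (r.2.1 ≤ code ∧ code ≤ r.2.2.1) →
        ¬(r'.2.1 ≤ code ∧ code ≤ r'.2.2.1)) := by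
  simp [CP932_RANGES, List.pairwise_cons]
  omega

-- ===== VERDICT (by name: the statement is the Claim_ definition above) =====
theorem code_to_glyph_index_spec : Claim_equal_code_to_glyph_index := by
  intro code range_mask _
  unfold Spec_code_to_glyph_index code_to_glyph_index code_to_glyph_index_alt
  rw [pvLoopA_char code range_mask CP932_RANGES 0 (pvRangesDisjoint code)]
  cases hfind : pvFindB code CP932_RANGES 0 with
  | none => rfl
  | some p =>
    obtain ⟨pos, bit, s⟩ := p
    by_cases hb : PySem.Int.band range_mask ((1 : Int) <<< bit) = 0
    · simp [hb]
    · simp only [if_neg hb, pvFoldSum]
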